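/- GENERATED by farm/mkstatement.py from design/units.split.tsv — do not edit.
   THE SPLIT of the proof unit `start_decoder.F2` into `start_decoder.F2a`, `start_decoder.F2b`, `start_decoder.F2c`, `start_decoder.F2d`: the children's statements give the parent's
   UNCHANGED statement (so nothing above the parent — callers, compositions — is touched by the split). -/
import Vorbis.Spec.StartDecoderF2
import Vorbis.Spec.Units.start_decoder_F2
import Vorbis.Spec.Units.start_decoder_F2a
import Vorbis.Spec.Units.start_decoder_F2b
import Vorbis.Spec.Units.start_decoder_F2c
import Vorbis.Spec.Units.start_decoder_F2d
namespace Vorbis.Spec.Splits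
open X86 X86.User Asan

/-- The children of the split unit `start_decoder.F2` prove it, by `Vorbis.Spec.StartDecoder.SegF2.of_parts`. -/
theorem start_decoder_F2
    (h_start_decoder_F2a : Vorbis.Spec.start_decoder_F2a.Statement)
    (h_start_decoder_F2b : Vorbis.Spec.start_decoder_F2b.Statement)
    (h_start_decoder_F2c : Vorbis.Spec.start_decoder_F2c.Statement)
    (h_start_decoder_F2d : Vorbis.Spec.start_decoder_F2d.Statement) :
    Vorbis.Spec.start_decoder_F2.Statement := by
  intro Lay _hLay μ _hμ u₀ _hcode _h_asan_load4_noabort _h_get_bits _h_asan_store2_noabort _h_asan_load8_noabort _h_asan_store1_noabort _h_error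
  apply Vorbis.Spec.StartDecoder.SegF2.of_parts
  · exact h_start_decoder_F2a Lay _hLay μ _hμ u₀ _hcode _h_asan_load4_noabort _h_get_bits
  · exact h_start_decoder_F2b Lay _hLay μ _hμ u₀ _hcode _h_get_bits _h_asan_store2_noabort _h_asan_load8_noabort _h_error
  · exact h_start_decoder_F2c Lay _hLay μ _hμ u₀ _hcode _h_asan_store1_noabort
  · exact h_start_decoder_F2d Lay _hLay μ _hμ u₀ _hcode _h_get_bits _h_asan_store1_noabort

end Vorbis.Spec.Splits
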